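-- pv_equiv track=rewrite | github.com/clusterofstars-sg/TinyHackathon | tinyhackathon/generate_instruct.py | combine_stories
-- ===== SOURCE A (Python) =====
-- def combine_stories(dataset, sep="\n\n"):
--     # Combine rows into full stories based on the start and end markers
--     full_stories = []
--     current_story = None
--
--     full_instructs = []
--     current_instructs = []
--
--     for row in dataset:
--         # If the row starts a story, start collecting sentences
--         if row.startswith("Story:"):
--             current_story = []  # Reset for the next story
--         elif row == "<|endoftext|>":
--             # If we encounter the end marker, finish the current story.
--             if current_story:
--                 full_stories.append(sep.join(current_story))
--                 full_instructs += ["\n".join(current_instructs)]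
--             current_instructs = []
--             current_story = None  # We are in instructs area next
--         else:
--             # Otherwise, continue collecting sentences/instructions
--             if current_story is not None:
--                 current_story.append(row)
--             else:
--                 current_instructs += [row]
--
--     # In case the last story doesn't have a proper end marker
--     if current_story:
--         full_stories.append(sep.join(current_story))
--         full_instructs += ["\n".join(current_instructs)]
--
--     return full_stories, full_instructs
-- ===== SOURCE B (Python) =====
-- def _split_on(rows, is_sep):
--     """Split rows into parts on separator rows (like str.split: n separators -> n+1 parts)."""
--     parts = [[]]
--     for r in rows:
--         if is_sep(r):
--             parts.append([])
--         else:
--             parts[-1].append(r)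
--     return parts
--
--
-- def combine_stories(dataset, sep="\n\n"):
--     stories, instructs = [], []
--     for segment in _split_on(dataset, lambda r: r == "<|endoftext|>"):
--         parts = _split_on(segment, lambda r: r.startswith("Story:"))
--         if len(parts) > 1 and parts[-1]:
--             stories.append(sep.join(parts[-1]))
--             instructs.append("\n".join(parts[0]))
--     return stories, instructs
-- ===== Notes on version B (the rewrite author's own statement) =====
-- stated objective: alternative
-- what changed: Replaces A's one-pass state machine (Optional current_story, carried instruction buffer) with a group-first decomposition: a generic str.split-style helper splits the rows into '<|endoftext|>'-delimited segments and again splits each segment on its 'Story:' marker rows, emitting (last part, first part) for segments with a marker and a nonempty story.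
import Mathlib
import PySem

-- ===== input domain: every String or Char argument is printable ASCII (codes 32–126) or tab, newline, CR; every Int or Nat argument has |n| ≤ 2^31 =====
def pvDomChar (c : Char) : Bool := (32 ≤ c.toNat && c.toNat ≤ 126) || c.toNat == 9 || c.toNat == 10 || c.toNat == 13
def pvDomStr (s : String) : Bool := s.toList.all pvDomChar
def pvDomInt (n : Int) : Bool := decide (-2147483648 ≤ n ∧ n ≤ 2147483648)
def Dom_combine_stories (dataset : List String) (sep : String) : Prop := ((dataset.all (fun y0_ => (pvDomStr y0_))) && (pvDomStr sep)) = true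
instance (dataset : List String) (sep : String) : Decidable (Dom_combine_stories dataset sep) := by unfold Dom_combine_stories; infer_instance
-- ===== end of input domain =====

-- B replaces A's one-pass state machine with a group-first decomposition: a generic
-- str.split-style helper splits the rows into "<|endoftext|>"-delimited segments and
-- again on "Story:" marker rows; objective: alternative decomposition, same cost.

-- ===== PORT A =====
-- state = (full_stories, current_story, full_instructs, current_instructs); current_story = none ↔ Python's None
def aStep (sep : String)
    (st : List String × Option (List String) × List String × List String) (row : String) :
    List String × Option (List String) × List String × List String :=
  match st with
  | (fs, cs, fi, ci) =>
    if PySem.Str.startswith row "Story:" then (fs, some [], fi, ci)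
    else if row = "<|endoftext|>" then
      match cs with
      | some l =>
        if l ≠ [] then (fs ++ [PySem.Str.join sep l], none, fi ++ [PySem.Str.join "\n" ci], [])
        else (fs, none, fi, [])
      | none => (fs, none, fi, [])
    else
      match cs with
      | some l => (fs, some (l ++ [row]), fi, ci)
      | none => (fs, none, fi, ci ++ [row])

def combine_stories (dataset : List String) (sep : String) : List String × List String :=
  match dataset.foldl (aStep sep) ([], none, [], []) with
  | (fs, some l, fi, ci) =>
    if l ≠ [] then (fs ++ [PySem.Str.join sep l], fi ++ [PySem.Str.join "\n" ci]) else (fs, fi)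
  | (fs, none, fi, _) => (fs, fi)

-- ===== PORT B =====
def bIsMark (r : String) : Bool := PySem.Str.startswith r "Story:"

-- _split_on's loop body: append an empty part on a separator row, else extend the last part
def sStep (isSep : String → Bool) (parts : List (List String)) (r : String) : List (List String) :=
  if isSep r then parts ++ [[]] else parts.dropLast ++ [parts.getLastD [] ++ [r]]

-- _split_on: n separator rows yield n+1 parts (the result is never empty)
def splitOnB (isSep : String → Bool) (rows : List String) : List (List String) :=
  rows.foldl (sStep isSep) [[]]

-- body of B's loop over segments: parts[-1] / parts[0] read via getLastD/headD (parts is never empty)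
def bFlushStep (sep : String) (acc : List String × List String) (segment : List String) :
    List String × List String :=
  if (splitOnB bIsMark segment).length > 1 ∧ (splitOnB bIsMark segment).getLastD [] ≠ [] then
    (acc.1 ++ [PySem.Str.join sep ((splitOnB bIsMark segment).getLastD [])],
     acc.2 ++ [PySem.Str.join "\n" ((splitOnB bIsMark segment).headD [])])
  else acc

def combine_stories_alt (dataset : List String) (sep : String) : List String × List String :=
  (splitOnB (fun r => r == "<|endoftext|>") dataset).foldl (bFlushStep sep) ([], [])

-- ===== PRECONDITION & SPEC =====
def Spec_combine_stories (dataset : List String) (sep : String) (out : List String × List String) : Prop := out = combine_stories_alt dataset sep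
instance (dataset : List String) (sep : String) (out : List String × List String) : Decidable (Spec_combine_stories dataset sep out) := by unfold Spec_combine_stories; infer_instance

-- ===== CLAIM (what is proved, stated in full; the proofs are below) =====
def Claim_equal_combine_stories : Prop := ∀ (dataset : List String) (sep : String), Dom_combine_stories dataset sep → Spec_combine_stories dataset sep (combine_stories dataset sep)

-- ===== LEMMAS AND PROOFS =====

-- A's (current_story, current_instructs) state as a function of the segment accumulated since the last flush
def segCS (seg : List String) : Option (List String) :=
  if seg.any bIsMark then some ((seg.reverse.takeWhile (fun r => !bIsMark r)).reverse) else none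

def segCI (seg : List String) : List String := seg.takeWhile (fun r => !bIsMark r)

lemma takeWhile_append_false {α : Type} (p : α → Bool) (l : List α) (x : α) (h : p x = false) :
    (l ++ [x]).takeWhile p = l.takeWhile p := by
  induction l with
  | nil => simp [List.takeWhile, h]
  | cons a t ih => cases hp : p a <;> simp [List.takeWhile, hp, ih]

lemma takeWhile_append_true {α : Type} (p : α → Bool) (l : List α) (x : α)
    (hl : l.all p = true) (h : p x = true) :
    (l ++ [x]).takeWhile p = l ++ [x] := by
  induction l with
  | nil => simp [List.takeWhile, h]
  | cons a t ih =>
    simp only [List.all_cons, Bool.and_eq_true] at hl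
    simp [hl.1, ih hl.2]

lemma takeWhile_of_all {α : Type} (p : α → Bool) (l : List α) (hl : l.all p = true) :
    l.takeWhile p = l := by
  induction l with
  | nil => rfl
  | cons a t ih =>
    simp only [List.all_cons, Bool.and_eq_true] at hl
    simp [hl.1, ih hl.2]

lemma takeWhile_append_of_any_not {α : Type} (p : α → Bool) (l l₂ : List α)
    (h : l.any (fun a => !p a) = true) :
    (l ++ l₂).takeWhile p = l.takeWhile p := by
  induction l with
  | nil => simp at h
  | cons a t ih =>
    cases hp : p a
    · simp [List.takeWhile, hp]
    · simp only [List.any_cons, hp, Bool.not_true, Bool.false_or] at h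
      simp [List.takeWhile, hp, ih h]

lemma mark_ne_eot (row : String) (h : PySem.Str.startswith row "Story:" = true) :
    row ≠ "<|endoftext|>" := by
  intro he; subst he; simp [PySem.Str.startswith] at h
  revert h; decide

-- splitOnB snoc behaviour
lemma splitOnB_snoc (p : String → Bool) (rows : List String) (r : String) :
    splitOnB p (rows ++ [r]) = sStep p (splitOnB p rows) r := by
  simp [splitOnB, List.foldl_append]

lemma splitOnB_ne_nil (p : String → Bool) (rows : List String) :
    splitOnB p rows ≠ [] := by
  induction rows using List.reverseRecOn with
  | nil => simp [splitOnB]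
  | append_singleton l r ih =>
    rw [splitOnB_snoc, sStep]
    split_ifs
    · simp
    · simp

lemma splitOnB_len (p : String → Bool) (rows : List String) :
    1 < (splitOnB p rows).length ↔ rows.any p = true := by
  induction rows using List.reverseRecOn with
  | nil => simp [splitOnB]
  | append_singleton l r ih =>
    have hpos : 0 < (splitOnB p l).length := List.length_pos_iff.mpr (splitOnB_ne_nil p l)
    rw [splitOnB_snoc, sStep]
    by_cases hp : p r = true
    · rw [if_pos hp]
      simp [List.any_append, hp]
      omega
    · have hp' : p r = false := by simpa using hp
      rw [if_neg (by simp [hp'])]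
      simp only [List.length_append, List.length_cons, List.length_nil, List.length_dropLast,
        List.any_append, List.any_cons, List.any_nil, hp', Bool.or_false]
      rw [← ih]
      omega

lemma splitOnB_getLastD (p : String → Bool) (rows : List String) :
    (splitOnB p rows).getLastD [] = (rows.reverse.takeWhile (fun r => !p r)).reverse := by
  induction rows using List.reverseRecOn with
  | nil => simp [splitOnB]
  | append_singleton l r ih =>
    rw [splitOnB_snoc, sStep]
    by_cases hp : p r = true
    · rw [if_pos hp, List.getLastD_concat]
      simp [hp]
    · have hp' : p r = false := by simpa using hp
      rw [if_neg (by simp [hp']), List.getLastD_concat, ih]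
      simp [hp']

lemma headD_append_of_ne_nil {α : Type} (l l₂ : List α) (d : α) (h : l ≠ []) :
    (l ++ l₂).headD d = l.headD d := by
  cases l with
  | nil => exact absurd rfl h
  | cons a t => simp

lemma splitOnB_headD (p : String → Bool) (rows : List String) :
    (splitOnB p rows).headD [] = rows.takeWhile (fun r => !p r) := by
  induction rows using List.reverseRecOn with
  | nil => simp [splitOnB]
  | append_singleton l r ih =>
    rw [splitOnB_snoc, sStep]
    by_cases hp : p r = true
    · rw [if_pos hp, headD_append_of_ne_nil _ _ _ (splitOnB_ne_nil p l), ih,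
        takeWhile_append_false _ _ _ (by simp [hp])]
    · have hp' : p r = false := by simpa using hp
      rw [if_neg (by simp [hp'])]
      by_cases hany : l.any p = true
      · have h2 : 1 < (splitOnB p l).length := (splitOnB_len p l).mpr hany
        have hd : (splitOnB p l).dropLast ≠ [] := by
          have hlen : (splitOnB p l).dropLast.length = (splitOnB p l).length - 1 := by simp
          intro hnil; rw [hnil] at hlen; simp at hlen; omega
        rw [headD_append_of_ne_nil _ _ _ hd]
        have hdh : (splitOnB p l).dropLast.headD [] = (splitOnB p l).headD [] := by
          cases hl : splitOnB p l with
          | nil => exact absurd hl (splitOnB_ne_nil p l)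
          | cons a t =>
            cases t with
            | nil => rw [hl] at h2; simp at h2
            | cons b u => simp [List.dropLast]
        rw [hdh, ih, takeWhile_append_of_any_not _ _ _ (by simpa using hany)]
      · have hany' : l.any p = false := by simpa using hany
        have hall : l.all (fun x => !p x) = true := by
          simpa [List.all_eq_not_any_not] using hany'
        have h1 : ¬ 1 < (splitOnB p l).length := by rw [splitOnB_len]; simp [hany']
        have hsingle : (splitOnB p l).dropLast = [] := by
          cases hl : splitOnB p l with
          | nil => exact absurd hl (splitOnB_ne_nil p l)
          | cons a t =>
            cases t with
            | nil => simp [List.dropLast]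
            | cons b u => rw [hl] at h1; simp at h1
        rw [hsingle, List.nil_append]
        have hlast : (splitOnB p l).getLastD [] = l := by
          rw [splitOnB_getLastD, takeWhile_of_all _ _ (by simpa [List.all_reverse] using hall)]
          simp
        simp only [List.headD_cons, hlast]
        rw [takeWhile_append_true _ _ _ hall (by simp [hp'])]

-- the flush of a single segment, characterised by segCS/segCI
lemma flush_char (sep : String) (acc : List String × List String) (seg : List String) :
    bFlushStep sep acc seg =
      match segCS seg with
      | some l =>
        if l ≠ [] then (acc.1 ++ [PySem.Str.join sep l], acc.2 ++ [PySem.Str.join "\n" (segCI seg)])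
        else acc
      | none => acc := by
  unfold bFlushStep segCS segCI
  by_cases hany : seg.any bIsMark = true
  · have hlen : 1 < (splitOnB bIsMark seg).length := (splitOnB_len bIsMark seg).mpr hany
    rw [splitOnB_getLastD, splitOnB_headD, if_pos hany]
    by_cases hne : (List.takeWhile (fun r => !bIsMark r) seg.reverse).reverse ≠ []
    · rw [if_pos ⟨hlen, hne⟩]; simp [hne]
    · rw [if_neg (by intro h; exact hne h.2)]
      simp only [ne_eq, Decidable.not_not] at hne
      simp [hne]
  · have hany' : seg.any bIsMark = false := by simpa using hany
    have h1 : ¬ 1 < (splitOnB bIsMark seg).length := by rw [splitOnB_len]; simp [hany']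
    rw [if_neg (by intro h; exact h1 h.1)]
    simp [hany']

-- the outer splitOnB fold only ever touches the last part
lemma foldl_sStep_shift (p : String → Bool) (rest : List String) :
    ∀ (ps : List (List String)) (seg : List String),
      rest.foldl (sStep p) (ps ++ [seg]) = ps ++ rest.foldl (sStep p) [seg] := by
  induction rest with
  | nil => intro ps seg; simp
  | cons r rest ih =>
    intro ps seg
    by_cases hp : p r = true
    · have h1 : sStep p (ps ++ [seg]) r = (ps ++ [seg]) ++ [[]] := by simp [sStep, hp]
      have h2 : sStep p [seg] r = [seg] ++ [[]] := by simp [sStep, hp]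
      simp only [List.foldl_cons, h1, h2]
      rw [ih (ps ++ [seg]) [], ih [seg] []]
      simp
    · have hp' : p r = false := by simpa using hp
      have h1 : sStep p (ps ++ [seg]) r = ps ++ [seg ++ [r]] := by
        simp [sStep, hp']
      have h2 : sStep p [seg] r = [seg ++ [r]] := by simp [sStep, hp']
      simp only [List.foldl_cons, h1, h2, ih]

-- B with an explicit open segment and remaining rows
def bRun (sep : String) (acc : List String × List String) (seg rest : List String) :
    List String × List String :=
  List.foldl (bFlushStep sep) acc (rest.foldl (sStep (fun r => r == "<|endoftext|>")) [seg])

lemma bRun_eq_alt (dataset : List String) (sep : String) :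
    combine_stories_alt dataset sep = bRun sep ([], []) [] dataset := rfl

-- segment facts (A's state transitions, phrased on segCS/segCI)
lemma segCS_mark (seg : List String) (row : String) (h : bIsMark row = true) :
    segCS (seg ++ [row]) = some [] := by
  simp [segCS, h]

lemma segCI_mark (seg : List String) (row : String) (h : bIsMark row = true) :
    segCI (seg ++ [row]) = segCI seg := by
  simp only [segCI]
  exact takeWhile_append_false _ _ _ (by simp [h])

lemma segCS_plain_some (seg : List String) (row : String) (h : bIsMark row = false)
    (hany : seg.any bIsMark = true) :
    segCS (seg ++ [row]) = some ((seg.reverse.takeWhile (fun r => !bIsMark r)).reverse ++ [row]) := by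
  simp only [segCS, List.any_append, hany, Bool.true_or, List.any_cons]
  have : (seg ++ [row]).reverse = row :: seg.reverse := by simp
  rw [if_pos (by simp), this]
  simp [List.takeWhile, h]

lemma segCS_plain_none (seg : List String) (row : String) (h : bIsMark row = false)
    (hany : seg.any bIsMark = false) :
    segCS (seg ++ [row]) = none := by
  simp [segCS, h, hany]

lemma segCI_plain_some (seg : List String) (row : String)
    (hany : seg.any bIsMark = true) :
    segCI (seg ++ [row]) = segCI seg := by
  simp only [segCI]
  exact takeWhile_append_of_any_not _ _ _ (by simpa using hany)

lemma segCI_plain_none (seg : List String) (row : String) (h : bIsMark row = false)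
    (hany : seg.any bIsMark = false) :
    segCI (seg ++ [row]) = segCI seg ++ [row] := by
  have hall : seg.all (fun r => !bIsMark r) = true := by
    simpa [List.all_eq_not_any_not] using hany
  simp only [segCI]
  rw [takeWhile_append_true _ _ _ hall (by simp [h]), takeWhile_of_all _ _ hall]

-- A's trailing flush
def aFin (sep : String) (st : List String × Option (List String) × List String × List String) :
    List String × List String :=
  match st with
  | (fs, some l, fi, ci) =>
    if l ≠ [] then (fs ++ [PySem.Str.join sep l], fi ++ [PySem.Str.join "\n" ci]) else (fs, fi)
  | (fs, none, fi, _) => (fs, fi)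

lemma aFin_seg (sep : String) (fs fi seg : List String) :
    aFin sep (fs, segCS seg, fi, segCI seg) = bFlushStep sep (fs, fi) seg := by
  rw [flush_char]
  by_cases hany : seg.any bIsMark = true
  · simp only [segCS, hany, if_pos, aFin, segCI]
  · simp only [Bool.not_eq_true] at hany
    simp [segCS, hany, aFin]

lemma segCS_nil : segCS [] = none := rfl

lemma segCI_nil : segCI [] = [] := rfl

lemma main_inv (sep : String) (rest : List String) : ∀ (seg fs fi : List String),
    aFin sep (List.foldl (aStep sep) (fs, segCS seg, fi, segCI seg) rest)
      = bRun sep (fs, fi) seg rest := by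
  induction rest with
  | nil =>
    intro seg fs fi
    simp only [List.foldl_nil, bRun, List.foldl_cons]
    exact aFin_seg sep fs fi seg
  | cons row rest ih =>
    intro seg fs fi
    simp only [List.foldl_cons]
    by_cases hm : bIsMark row = true
    · -- "Story:" row
      have hne : row ≠ "<|endoftext|>" := mark_ne_eot row hm
      have hm' : PySem.Str.startswith row "Story:" = true := hm
      have hstep : aStep sep (fs, segCS seg, fi, segCI seg) row
          = (fs, segCS (seg ++ [row]), fi, segCI (seg ++ [row])) := by
        rw [segCS_mark _ _ hm, segCI_mark _ _ hm]
        simp only [aStep]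
        rw [if_pos hm']
      have hb : bRun sep (fs, fi) seg (row :: rest) = bRun sep (fs, fi) (seg ++ [row]) rest := by
        simp only [bRun, List.foldl_cons, sStep]
        rw [if_neg (by simp [hne])]
        simp
      rw [hstep, ih, hb]
    · have hm' : bIsMark row = false := by simpa using hm
      by_cases he : row = "<|endoftext|>"
      · -- end-of-text row: close the segment and flush it
        subst he
        have hsw : PySem.Str.startswith "<|endoftext|>" "Story:" = false := by decide
        have hstep : aStep sep (fs, segCS seg, fi, segCI seg) "<|endoftext|>"
            = ((bFlushStep sep (fs, fi) seg).1, none, (bFlushStep sep (fs, fi) seg).2, []) := by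
          simp only [aStep, hsw, Bool.false_eq_true, if_false]
          rw [flush_char]
          by_cases hany : seg.any bIsMark = true
          · simp only [segCS, hany, if_pos, segCI]
            split_ifs with h <;> rfl
          · simp only [Bool.not_eq_true] at hany
            simp [segCS, hany]
        have hb : bRun sep (fs, fi) seg ("<|endoftext|>" :: rest)
            = bRun sep (bFlushStep sep (fs, fi) seg) [] rest := by
          simp only [bRun, List.foldl_cons, sStep]
          rw [if_pos (by simp)]
          rw [show ([seg] ++ [([] : List String)]) = [seg] ++ [[]] from rfl]
          rw [foldl_sStep_shift]
          rw [List.foldl_append]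
          simp
        rw [hstep, hb]
        have := ih [] (bFlushStep sep (fs, fi) seg).1 (bFlushStep sep (fs, fi) seg).2
        rw [segCS_nil, segCI_nil] at this
        simpa using this
      · -- ordinary row
        have hstep : aStep sep (fs, segCS seg, fi, segCI seg) row
            = (fs, segCS (seg ++ [row]), fi, segCI (seg ++ [row])) := by
          simp only [aStep]
          rw [if_neg (by simp only [Bool.not_eq_true]; simpa [bIsMark] using hm'), if_neg he]
          by_cases hany : seg.any bIsMark = true
          · rw [segCS_plain_some _ _ hm' hany, segCI_plain_some _ _ hany]
            simp [segCS, hany]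
          · simp only [Bool.not_eq_true] at hany
            rw [segCS_plain_none _ _ hm' hany, segCI_plain_none _ _ hm' hany]
            simp [segCS, hany]
        have hb : bRun sep (fs, fi) seg (row :: rest) = bRun sep (fs, fi) (seg ++ [row]) rest := by
          simp only [bRun, List.foldl_cons, sStep]
          rw [if_neg (by simp [he])]
          simp
        rw [hstep, ih, hb]

-- ===== VERDICT (by name: the statement is the Claim_ definition above) =====
theorem combine_stories_spec : Claim_equal_combine_stories := by
  intro dataset sep _
  unfold Spec_combine_stories combine_stories
  rw [bRun_eq_alt]
  have h := main_inv sep dataset [] [] []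
  rw [segCS_nil, segCI_nil] at h
  rw [← h]
  rfl
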